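-- pv_equiv track=rewrite | github.com/mwt2212/job_finder | text_cleaning.py | clean_job_description
-- ===== SOURCE A (Python) =====
-- from typing import List
--
-- DESCRIPTION_TRUNCATE_MARKERS = [
--     "set alert for similar jobs",
--     "see more jobs like this",
--     "job search smarter with premium",
--     "looking for talent?",
--     "linkedin corporation",
--     "about the company",
--     "select language",
-- ]
--
-- NOISE_LINE_MARKERS = [
--     "show more",
--     "show less",
--     "sign in to view more",
--     "join now",
-- ]
--
-- def clean_job_description(text: str, max_len: int = 8000) -> str:
--     if not text:
--         return ""
--
--     lines = (text or "").splitlines()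
--     kept: List[str] = []
--     last_blank = False
--     for line in lines:
--         raw = line.rstrip()
--         low = raw.strip().lower()
--         if any(marker in low for marker in DESCRIPTION_TRUNCATE_MARKERS):
--             break
--         if any(noise == low for noise in NOISE_LINE_MARKERS):
--             continue
--         if not raw.strip():
--             if not last_blank:
--                 kept.append("")
--             last_blank = True
--             continue
--         kept.append(raw)
--         last_blank = False
--
--     cleaned = "\n".join(kept).strip()
--     return cleaned[:max_len]
-- ===== SOURCE B (Python) =====
-- from typing import List
--
-- DESCRIPTION_TRUNCATE_MARKERS = [
--     "set alert for similar jobs",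
--     "see more jobs like this",
--     "job search smarter with premium",
--     "looking for talent?",
--     "linkedin corporation",
--     "about the company",
--     "select language",
-- ]
--
-- NOISE_LINE_MARKERS = [
--     "show more",
--     "show less",
--     "sign in to view more",
--     "join now",
-- ]
--
--
-- def clean_job_description(text: str, max_len: int = 8000) -> str:
--     if not text:
--         return ""
--
--     # Normalise every line once up front.
--     raws = [line.rstrip() for line in text.splitlines()]
--
--     # Phase 1: find where the description is truncated.
--     cut = len(raws)
--     for i, raw in enumerate(raws):
--         low = raw.strip().lower()
--         if any(marker in low for marker in DESCRIPTION_TRUNCATE_MARKERS):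
--             cut = i
--             break
--
--     # Phase 2: segment the kept lines into paragraphs (maximal runs of
--     # non-blank lines), dropping noise lines; blank lines only delimit.
--     paragraphs: List[List[str]] = []
--     current: List[str] = []
--     for raw in raws[:cut]:
--         low = raw.strip().lower()
--         if low in NOISE_LINE_MARKERS:
--             continue
--         if raw.strip():
--             current.append(raw)
--         elif current:
--             paragraphs.append(current)
--             current = []
--     if current:
--         paragraphs.append(current)
--
--     # Phase 3: paragraphs are joined by one blank line.
--     return "\n\n".join("\n".join(p) for p in paragraphs).strip()[:max_len]
-- ===== Notes on version B (the rewrite author's own statement) =====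
-- stated objective: alternative
-- what changed: A's single stateful loop (break/continue with a last_blank flag emitting sentinel empty lines, then join and strip) is replaced by paragraph segmentation: first find the truncate cut index, then group the kept lines into maximal non-blank runs (paragraphs; blank lines only delimit, noise lines are dropped), then join the paragraphs with one blank line between them; no blank-collapse state or sentinel lines exist.
import Mathlib
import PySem

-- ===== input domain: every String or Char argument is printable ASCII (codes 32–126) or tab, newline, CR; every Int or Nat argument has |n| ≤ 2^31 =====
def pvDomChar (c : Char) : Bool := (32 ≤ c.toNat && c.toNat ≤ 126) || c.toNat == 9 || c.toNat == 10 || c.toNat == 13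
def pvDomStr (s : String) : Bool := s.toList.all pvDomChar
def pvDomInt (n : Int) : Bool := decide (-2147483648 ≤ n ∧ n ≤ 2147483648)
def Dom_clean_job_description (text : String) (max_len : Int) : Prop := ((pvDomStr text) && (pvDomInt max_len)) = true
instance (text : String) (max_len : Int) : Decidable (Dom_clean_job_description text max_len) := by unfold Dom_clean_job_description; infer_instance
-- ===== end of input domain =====

-- B replaces A's single stateful loop (break/continue, sentinel '' lines, a last_blank flag)
-- by paragraph segmentation: find the truncate cut index, group the kept lines into maximal
-- non-blank runs (noise dropped, blanks only delimit), join paragraphs with one blank line;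
-- objective: alternative algorithm, same cost.

-- ===== PORT A =====
def pvTruncMarkers : List String :=
  ["set alert for similar jobs", "see more jobs like this", "job search smarter with premium",
   "looking for talent?", "linkedin corporation", "about the company", "select language"]

def pvNoiseMarkers : List String :=
  ["show more", "show less", "sign in to view more", "join now"]

-- A's for-loop with break/continue and the (kept, last_blank) state, as structural recursion.
def pvLoopA : List String → List String → Bool → List String
  | [], kept, _ => kept
  | line :: rest, kept, lastBlank =>
    let raw := PySem.Str.rstrip line
    let low := PySem.Str.lower (PySem.Str.strip raw)
    if pvTruncMarkers.any (fun marker => PySem.Str.isIn marker low) then kept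
    else if pvNoiseMarkers.any (fun noise => noise == low) then pvLoopA rest kept lastBlank
    else if PySem.Str.strip raw == "" then
      if lastBlank then pvLoopA rest kept true
      else pvLoopA rest (kept ++ [""]) true
    else pvLoopA rest (kept ++ [raw]) false

def clean_job_description (text : String) (max_len : Int) : String :=
  if text == "" then "" else
    let lines := PySem.Str.splitlines text
    let kept := pvLoopA lines [] false
    let cleaned := PySem.Str.strip (PySem.Str.join "\n" kept)
    PySem.Str.slice cleaned none (some max_len)

-- ===== PORT B =====
-- phase 1 of Source B: 'for i, raw in enumerate(raws): if any(...): cut = i; break'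
def pvFindCut : List (Int × String) → Int → Int
  | [], cut => cut
  | (i, raw) :: rest, cut =>
    let low := PySem.Str.lower (PySem.Str.strip raw)
    if pvTruncMarkers.any (fun marker => PySem.Str.isIn marker low) then i
    else pvFindCut rest cut

-- phase 2 of Source B: the (paragraphs, current) accumulator loop
def pvParaLoop : List String → List (List String) → List String → List (List String) × List String
  | [], paras, cur => (paras, cur)
  | raw :: rest, paras, cur =>
    let low := PySem.Str.lower (PySem.Str.strip raw)
    if pvNoiseMarkers.contains low then pvParaLoop rest paras cur
    else if !(PySem.Str.strip raw == "") then pvParaLoop rest paras (cur ++ [raw])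
    else if !cur.isEmpty then pvParaLoop rest (paras ++ [cur]) []
    else pvParaLoop rest paras cur

def clean_job_description_alt (text : String) (max_len : Int) : String :=
  if text == "" then "" else
    let raws := (PySem.Str.splitlines text).map PySem.Str.rstrip
    let cut := pvFindCut (PySem.List.enumerate raws 0) (raws.length : Int)
    let pc := pvParaLoop (PySem.List.slice raws none (some cut)) [] []
    let paras := if !pc.2.isEmpty then pc.1 ++ [pc.2] else pc.1
    PySem.Str.slice
      (PySem.Str.strip (PySem.Str.join "\n\n" (paras.map (PySem.Str.join "\n"))))
      none (some max_len)

-- ===== PRECONDITION & SPEC =====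
def Spec_clean_job_description (text : String) (max_len : Int) (out : String) : Prop := out = clean_job_description_alt text max_len
instance (text : String) (max_len : Int) (out : String) : Decidable (Spec_clean_job_description text max_len out) := by unfold Spec_clean_job_description; infer_instance

-- ===== CLAIM (what is proved, stated in full; the proofs are below) =====
def Claim_equal_clean_job_description : Prop := ∀ (text : String) (max_len : Int), Dom_clean_job_description text max_len → Spec_clean_job_description text max_len (clean_job_description text max_len)

-- ===== LEMMAS AND PROOFS =====

-- proof-side abbreviations for the three line predicates both programs test
def pvIsTrunc (l : String) : Bool :=
  pvTruncMarkers.any (fun m => PySem.Str.isIn m (PySem.Str.lower (PySem.Str.strip l)))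

def pvIsNoise (l : String) : Bool :=
  pvNoiseMarkers.any (fun n => n == PySem.Str.lower (PySem.Str.strip l))

def pvIsBlank (l : String) : Bool := PySem.Str.strip l == ""

-- A's blank-collapse on the filtered prefix: one "" per blank run
def pvCollapse : List String → List String
  | [] => []
  | l :: ls =>
    if pvIsBlank l then "" :: pvCollapse (ls.dropWhile pvIsBlank)
    else l :: pvCollapse ls
termination_by xs => xs.length
decreasing_by
  · have := List.length_dropWhile_le pvIsBlank ls; simp; omega
  · simp

-- canonical paragraph decomposition: maximal runs of non-blank lines
def pvParas : List String → List (List String)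
  | [] => []
  | l :: ls =>
    if pvIsBlank l then pvParas ls
    else (l :: ls.takeWhile (fun r => !pvIsBlank r)) :: pvParas (ls.dropWhile (fun r => !pvIsBlank r))
termination_by xs => xs.length
decreasing_by
  · simp
  · have := List.length_dropWhile_le (fun r => !pvIsBlank r) ls; simp; omega

-- B's paragraph loop with the 'paras' accumulator made structural
def pvRunsAux : List String → List String → List (List String)
  | cur, [] => if !cur.isEmpty then [cur] else []
  | cur, raw :: rest =>
    if pvIsNoise raw then pvRunsAux cur rest
    else if !pvIsBlank raw then pvRunsAux (cur ++ [raw]) rest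
    else if !cur.isEmpty then cur :: pvRunsAux [] rest
    else pvRunsAux [] rest

-- does the list end in a blank line?
def pvTrail (l : List String) : Bool := (l.getLast?.map pvIsBlank).getD false

-- Python 'x in list' = any(m == x)
lemma pvContains_eq (l : List String) (s : String) :
    l.contains s = l.any (fun n => n == s) := by
  induction l with
  | nil => rfl
  | cons h t ih =>
    simp only [List.contains_cons, List.any_cons, ih]
    by_cases hh : s = h
    · subst hh; simp
    · have h1 : (s == h) = false := by simpa using hh
      have h2 : (h == s) = false := by simpa using Ne.symm hh
      simp [h1, h2]

-- A's interleaved loop equals the staged pipeline, for any accumulator and blank flag.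
lemma pvLoopA_eq (lines : List String) : ∀ (kept : List String) (b : Bool),
    pvLoopA lines kept b =
      kept ++ (let body := ((lines.map PySem.Str.rstrip).takeWhile (fun l => !pvIsTrunc l)).filter
                  (fun l => !pvIsNoise l)
               if b then pvCollapse (body.dropWhile pvIsBlank) else pvCollapse body) := by
  induction lines with
  | nil => intro kept b; cases b <;> simp [pvLoopA, pvCollapse]
  | cons line rest ih =>
    intro kept b
    simp only [pvLoopA, List.map_cons, List.takeWhile_cons]
    cases ht : pvIsTrunc (PySem.Str.rstrip line) with
    | true =>
      have ht' : (pvTruncMarkers.any fun marker =>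
          PySem.Str.isIn marker (PySem.Str.lower (PySem.Str.strip (PySem.Str.rstrip line)))) = true := ht
      have htn : (!pvIsTrunc (PySem.Str.rstrip line)) = false := by simp [ht]
      cases b <;> rw [ht'] <;> simp [pvCollapse]
    | false =>
      have ht' : (pvTruncMarkers.any fun marker =>
          PySem.Str.isIn marker (PySem.Str.lower (PySem.Str.strip (PySem.Str.rstrip line)))) = false := ht
      simp only [ht', Bool.false_eq_true, if_false, Bool.not_false, if_true, List.filter_cons]
      cases hn : pvIsNoise (PySem.Str.rstrip line) with
      | true =>
        have hn' : (pvNoiseMarkers.any fun noise =>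
            noise == PySem.Str.lower (PySem.Str.strip (PySem.Str.rstrip line))) = true := hn
        simp only [hn', if_true, Bool.not_true, Bool.false_eq_true, if_false]
        exact ih kept b
      | false =>
        have hn' : (pvNoiseMarkers.any fun noise =>
            noise == PySem.Str.lower (PySem.Str.strip (PySem.Str.rstrip line))) = false := hn
        simp only [hn', Bool.false_eq_true, if_false, Bool.not_false, if_true]
        cases hb : pvIsBlank (PySem.Str.rstrip line) with
        | true =>
          have hb' : (PySem.Str.strip (PySem.Str.rstrip line) == "") = true := hb
          simp only [hb', if_true]
          cases b with
          | false =>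
            rw [ih (kept ++ [""]) true]
            simp [pvCollapse, hb]
          | true =>
            rw [ih kept true]
            simp [hb]
        | false =>
          have hb' : (PySem.Str.strip (PySem.Str.rstrip line) == "") = false := hb
          simp only [hb', Bool.false_eq_true, if_false]
          rw [ih (kept ++ [PySem.Str.rstrip line]) false]
          cases b <;> simp [pvCollapse, hb]

-- phase 1: the cut index is the length of the truncate-free prefix
lemma pvFindCut_eq (raws : List String) : ∀ (s d : Int),
    pvFindCut (PySem.List.enumerate raws s) d =
      if raws.all (fun r => !pvIsTrunc r) then d
      else s + ((raws.takeWhile (fun r => !pvIsTrunc r)).length : Int) := by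
  induction raws with
  | nil => intro s d; simp [PySem.List.enumerate_nil, pvFindCut]
  | cons r rest ih =>
    intro s d
    rw [PySem.List.enumerate_cons]
    simp only [pvFindCut]
    cases ht : pvIsTrunc r with
    | true =>
      have ht' : (pvTruncMarkers.any fun marker =>
          PySem.Str.isIn marker (PySem.Str.lower (PySem.Str.strip r))) = true := ht
      rw [ht']
      simp [List.all_cons, ht]
    | false =>
      have ht' : (pvTruncMarkers.any fun marker =>
          PySem.Str.isIn marker (PySem.Str.lower (PySem.Str.strip r))) = false := ht
      rw [ht']
      simp only [Bool.false_eq_true, if_false]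
      rw [ih (s + 1) d]
      simp only [List.all_cons, ht, Bool.not_false, Bool.true_and, List.takeWhile_cons]
      cases rest.all (fun r => !pvIsTrunc r) with
      | true => simp
      | false =>
        simp only [Bool.false_eq_true, if_false]
        push_cast [List.length_cons]; omega

-- phase 2: the paragraph loop is pvRunsAux
lemma pvParaLoop_eq (l : List String) : ∀ (paras : List (List String)) (cur : List String),
    (if !(pvParaLoop l paras cur).2.isEmpty
      then (pvParaLoop l paras cur).1 ++ [(pvParaLoop l paras cur).2]
      else (pvParaLoop l paras cur).1) = paras ++ pvRunsAux cur l := by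
  induction l with
  | nil =>
    intro paras cur
    simp only [pvParaLoop, pvRunsAux]
    cases cur.isEmpty <;> simp_all
  | cons raw rest ih =>
    intro paras cur
    simp only [pvParaLoop, pvRunsAux, pvContains_eq]
    cases hn : pvIsNoise raw with
    | true =>
      have hn' : (pvNoiseMarkers.any fun n =>
          n == PySem.Str.lower (PySem.Str.strip raw)) = true := hn
      rw [hn']
      simp only [if_true]
      exact ih paras cur
    | false =>
      have hn' : (pvNoiseMarkers.any fun n =>
          n == PySem.Str.lower (PySem.Str.strip raw)) = false := hn
      rw [hn']
      simp only [Bool.false_eq_true, if_false]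
      cases hb : pvIsBlank raw with
      | false =>
        have hb' : (PySem.Str.strip raw == "") = false := hb
        simp only [hb', Bool.not_false, if_true]
        exact ih paras (cur ++ [raw])
      | true =>
        have hb' : (PySem.Str.strip raw == "") = true := hb
        simp only [hb', Bool.not_true, Bool.false_eq_true, if_false]
        cases hc : cur.isEmpty with
        | false =>
          simp only [Bool.not_false, if_true]
          rw [ih (paras ++ [cur]) []]
          simp
        | true =>
          simp only [Bool.not_true, Bool.false_eq_true, if_false]
          have : cur = [] := List.isEmpty_iff.mp hc
          subst this
          exact ih paras []

-- noise lines can be filtered out up front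
lemma pvRunsAux_filter (l : List String) : ∀ (cur : List String),
    pvRunsAux cur l = pvRunsAux cur (l.filter (fun r => !pvIsNoise r)) := by
  induction l with
  | nil => intro cur; rfl
  | cons raw rest ih =>
    intro cur
    simp only [List.filter_cons]
    cases hn : pvIsNoise raw with
    | true => simp only [pvRunsAux, hn, if_true, Bool.not_true, Bool.false_eq_true, if_false]; exact ih cur
    | false =>
      simp only [Bool.not_false, if_true, pvRunsAux, hn, Bool.false_eq_true, if_false]
      cases hb : pvIsBlank raw with
      | false => simp only [Bool.not_false, if_true]; exact ih (cur ++ [raw])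
      | true =>
        simp only [Bool.not_true, Bool.false_eq_true, if_false]
        cases cur.isEmpty <;> simp only [Bool.not_true, Bool.not_false, if_true,
          Bool.false_eq_true, if_false] <;> rw [ih []]

-- on a noise-free list, pvRunsAux is the canonical paragraph decomposition
lemma pvRunsAux_paras (n : Nat) : ∀ (l : List String), l.length ≤ n →
    (∀ x ∈ l, pvIsNoise x = false) →
    (∀ cur : List String, cur ≠ [] →
      pvRunsAux cur l = (cur ++ l.takeWhile (fun r => !pvIsBlank r)) ::
        pvParas (l.dropWhile (fun r => !pvIsBlank r)))
    ∧ pvRunsAux [] l = pvParas l := by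
  induction n with
  | zero =>
    intro l hl hnf
    have : l = [] := List.eq_nil_of_length_eq_zero (Nat.le_zero.mp hl)
    subst this
    refine ⟨?_, by simp [pvRunsAux, pvParas]⟩
    intro cur hcur
    have hc : cur.isEmpty = false := by simpa [List.isEmpty_iff] using hcur
    simp [pvRunsAux, pvParas, hc]
  | succ n ih =>
    intro l hl hnf
    cases l with
    | nil =>
      refine ⟨?_, by simp [pvRunsAux, pvParas]⟩
      intro cur hcur
      have hc : cur.isEmpty = false := by simpa [List.isEmpty_iff] using hcur
      simp [pvRunsAux, pvParas, hc]
    | cons raw rest =>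
      have hnr : pvIsNoise raw = false := hnf raw (by simp)
      have hrest : rest.length ≤ n := by
        have := hl; simp only [List.length_cons] at this; omega
      have hnfr : ∀ x ∈ rest, pvIsNoise x = false := fun x hx => hnf x (by simp [hx])
      have IH := ih rest hrest hnfr
      constructor
      · intro cur hcur
        have hc : cur.isEmpty = false := by simpa [List.isEmpty_iff] using hcur
        simp only [pvRunsAux, hnr, Bool.false_eq_true, if_false]
        cases hb : pvIsBlank raw with
        | false =>
          simp only [Bool.not_false, if_true]
          rw [IH.1 (cur ++ [raw]) (by simp)]
          rw [List.takeWhile_cons_of_pos (p := fun r => !pvIsBlank r) (by simp [hb]),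
              List.dropWhile_cons_of_pos (p := fun r => !pvIsBlank r) (by simp [hb])]
          simp [List.append_assoc]
        | true =>
          simp only [Bool.not_true, Bool.false_eq_true, if_false, hc, Bool.not_false, if_true]
          rw [IH.2]
          rw [List.takeWhile_cons_of_neg (p := fun r => !pvIsBlank r) (by simp [hb]),
              List.dropWhile_cons_of_neg (p := fun r => !pvIsBlank r) (by simp [hb])]
          simp [pvParas, hb]
      · simp only [pvRunsAux, hnr, Bool.false_eq_true, if_false]
        cases hb : pvIsBlank raw with
        | false =>
          simp only [Bool.not_false, if_true, List.nil_append]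
          rw [IH.1 [raw] (by simp)]
          rw [show pvParas (raw :: rest) =
              (raw :: rest.takeWhile (fun r => !pvIsBlank r)) ::
                pvParas (rest.dropWhile (fun r => !pvIsBlank r)) from by simp [pvParas, hb]]
          simp
        | true =>
          simp only [Bool.not_true, Bool.false_eq_true, if_false, List.isEmpty_nil, if_false]
          rw [IH.2]
          simp [pvParas, hb]

-- leading blanks do not change the paragraphs
lemma pvParas_dropWhile (l : List String) :
    pvParas (l.dropWhile pvIsBlank) = pvParas l := by
  induction l with
  | nil => rfl
  | cons a t ih =>
    cases hb : pvIsBlank a with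
    | true => rw [List.dropWhile_cons_of_pos hb, ih]; simp [pvParas, hb]
    | false => rw [List.dropWhile_cons_of_neg (by simp [hb])]

-- '\n' is whitespace
lemma pvIsspace_nl : PySem.Chars.isspace '\n' = true := by decide

lemma pvStrip_cons_nl (cs : List Char) :
    PySem.Chars.strip ('\n' :: cs) = PySem.Chars.strip cs := by
  simp [PySem.Chars.strip, PySem.Chars.lstrip, pvIsspace_nl]

lemma pvRstrip_append_nl (cs : List Char) :
    PySem.Chars.rstrip (cs ++ ['\n']) = PySem.Chars.rstrip cs := by
  simp [PySem.Chars.rstrip, pvIsspace_nl]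

lemma pvStrip_append_nl (cs : List Char) :
    PySem.Chars.strip (cs ++ ['\n']) = PySem.Chars.strip cs := by
  simp only [PySem.Chars.strip, PySem.Chars.lstrip, List.dropWhile_append]
  cases he : (cs.dropWhile PySem.Chars.isspace).isEmpty with
  | true =>
    simp only [if_true]
    have : (cs.dropWhile PySem.Chars.isspace) = [] := List.isEmpty_iff.mp he
    simp [this, pvIsspace_nl, PySem.Chars.rstrip]
  | false =>
    simp only [Bool.false_eq_true, if_false]
    exact pvRstrip_append_nl _

-- join over a split list
lemma pvJoin_append (sep : List Char) (xs ys : List (List Char)) (hx : xs ≠ []) (hy : ys ≠ []) :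
    PySem.Chars.join sep (xs ++ ys) =
      PySem.Chars.join sep xs ++ sep ++ PySem.Chars.join sep ys := by
  induction xs with
  | nil => exact absurd rfl hx
  | cons x xs' ih =>
    cases xs' with
    | nil =>
      cases ys with
      | nil => exact absurd rfl hy
      | cons y ys' =>
        simp [PySem.Chars.join_cons_cons, PySem.Chars.join_singleton, List.append_assoc]
    | cons x' xs'' =>
      have hih := ih (by simp)
      simp only [List.cons_append] at hih ⊢
      rw [PySem.Chars.join_cons_cons, PySem.Chars.join_cons_cons, hih]
      simp [List.append_assoc]

-- collapsing copies a non-blank run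
lemma pvCollapse_append_run (run : List String) (rest : List String)
    (h : ∀ x ∈ run, pvIsBlank x = false) :
    pvCollapse (run ++ rest) = run ++ pvCollapse rest := by
  induction run with
  | nil => simp
  | cons r run' ih =>
    have hr : pvIsBlank r = false := h r (by simp)
    rw [List.cons_append]
    rw [pvCollapse]
    simp only [hr, Bool.false_eq_true, if_false]
    rw [ih (fun x hx => h x (by simp [hx]))]
    rfl

-- the normal form of the collapsed list, for a list with non-blank head
lemma pvCollapse_norm (n : Nat) : ∀ (l : List String), l.length ≤ n →
    (∀ a t, l = a :: t → pvIsBlank a = false) →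
    PySem.Chars.join ['\n'] ((pvCollapse l).map String.toList) =
      PySem.Chars.join ['\n', '\n']
        ((pvParas l).map (fun run => PySem.Chars.join ['\n'] (run.map String.toList)))
      ++ (if pvTrail l then ['\n'] else []) := by
  induction n with
  | zero =>
    intro l hl _
    have : l = [] := List.eq_nil_of_length_eq_zero (Nat.le_zero.mp hl)
    subst this
    simp [pvCollapse, pvParas, pvTrail, PySem.Chars.join_nil]
  | succ n ih =>
    intro l hl hhead
    cases l with
    | nil => simp [pvCollapse, pvParas, pvTrail, PySem.Chars.join_nil]
    | cons r rest =>
      have hr : pvIsBlank r = false := hhead r rest rfl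
      have hsplit : rest = rest.takeWhile (fun x => !pvIsBlank x) ++
          rest.dropWhile (fun x => !pvIsBlank x) := List.takeWhile_append_dropWhile.symm
      have htwnb : ∀ x ∈ r :: rest.takeWhile (fun x => !pvIsBlank x), pvIsBlank x = false := by
        intro x hx
        rcases List.mem_cons.mp hx with rfl | hx
        · exact hr
        · simpa using List.mem_takeWhile_imp hx
      have hcol : pvCollapse (r :: rest) =
          (r :: rest.takeWhile (fun x => !pvIsBlank x)) ++
            pvCollapse (rest.dropWhile (fun x => !pvIsBlank x)) := by
        conv_lhs => rw [hsplit]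
        rw [show r :: (rest.takeWhile (fun x => !pvIsBlank x) ++
              rest.dropWhile (fun x => !pvIsBlank x)) =
            (r :: rest.takeWhile (fun x => !pvIsBlank x)) ++
              rest.dropWhile (fun x => !pvIsBlank x) from rfl]
        exact pvCollapse_append_run _ _ htwnb
      have hparas : pvParas (r :: rest) =
          (r :: rest.takeWhile (fun x => !pvIsBlank x)) ::
            pvParas (rest.dropWhile (fun x => !pvIsBlank x)) := by
        simp [pvParas, hr]
      rw [hcol, hparas]
      cases hdwc : rest.dropWhile (fun x => !pvIsBlank x) with
      | nil =>
        have htr : pvTrail (r :: rest) = false := by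
          have hall : ∀ x ∈ r :: rest, pvIsBlank x = false := by
            intro x hx
            rcases List.mem_cons.mp hx with rfl | hx
            · exact hr
            · conv at hx => rw [hsplit]
              rcases List.mem_append.mp hx with hx | hx
              · simpa using List.mem_takeWhile_imp hx
              · rw [hdwc] at hx; simp at hx
          have hmem := List.getLast_mem (l := r :: rest) (by simp)
          unfold pvTrail
          rw [List.getLast?_eq_some_getLast (l := r :: rest) (by simp)]
          simp [hall _ hmem]
        rw [htr]
        simp [pvCollapse, pvParas, PySem.Chars.join_singleton]
      | cons d dw2 =>
        have hd : pvIsBlank d = true := by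
          have hne : rest.dropWhile (fun x => !pvIsBlank x) ≠ [] := by rw [hdwc]; simp
          have h5 := List.head_dropWhile_not (fun x => !pvIsBlank x) hne
          simp only [hdwc, List.head_cons] at h5
          simpa using h5
        have hcold : pvCollapse (d :: dw2) = "" :: pvCollapse (dw2.dropWhile pvIsBlank) := by
          simp [pvCollapse, hd]
        have hpd : pvParas (d :: dw2) = pvParas (dw2.dropWhile pvIsBlank) := by
          rw [show pvParas (d :: dw2) = pvParas dw2 from by simp [pvParas, hd]]
          exact (pvParas_dropWhile dw2).symm
        have hlen : (dw2.dropWhile pvIsBlank).length ≤ n := by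
          have h1 := List.length_dropWhile_le pvIsBlank dw2
          have h2 : rest.length = (rest.takeWhile (fun x => !pvIsBlank x)).length +
              (d :: dw2).length := by
            conv_lhs => rw [hsplit]
            rw [hdwc, List.length_append]
          simp only [List.length_cons] at h2 hl
          omega
        rw [hcold]
        -- split the join at the run boundary
        rw [List.map_append, pvJoin_append _ _ _ (by simp) (by simp)]
        cases hec : pvCollapse (dw2.dropWhile pvIsBlank) with
        | nil =>
          -- the tail is all blank: collapse gave just [""]
          have heq : dw2.dropWhile pvIsBlank = [] := by
            cases he' : dw2.dropWhile pvIsBlank with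
            | nil => rfl
            | cons x e2 =>
              have hx : pvIsBlank x = false := by
                have hne : dw2.dropWhile pvIsBlank ≠ [] := by rw [he']; simp
                have h5 := List.head_dropWhile_not pvIsBlank hne
                simp only [he', List.head_cons] at h5
                simpa using h5
              rw [he'] at hec
              simp [pvCollapse, hx] at hec
          have hallb : ∀ x ∈ d :: dw2, pvIsBlank x = true := by
            intro x hx
            rcases List.mem_cons.mp hx with rfl | hx
            · exact hd
            · exact List.dropWhile_eq_nil_iff.mp heq x hx
          have htr : pvTrail (r :: rest) = true := by
            have hgl : (r :: rest).getLast? = (d :: dw2).getLast? := by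
              have hsh : r :: rest = (r :: rest.takeWhile (fun x => !pvIsBlank x)) ++
                  (d :: dw2) := by
                rw [List.cons_append]
                refine congrArg (r :: ·) ?_
                rw [← hdwc]
                exact hsplit
              rw [hsh]
              exact List.getLast?_append_of_ne_nil _ (by simp)
            have hmem := List.getLast_mem (l := d :: dw2) (by simp)
            unfold pvTrail
            rw [hgl, List.getLast?_eq_some_getLast (l := d :: dw2) (by simp)]
            simp [hallb _ hmem]
          rw [htr]
          have hpe : pvParas (dw2.dropWhile pvIsBlank) = [] := by rw [heq]; simp [pvParas]
          rw [hpd, hpe]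
          simp [PySem.Chars.join_singleton]
        | cons y ys =>
          -- the tail has another paragraph
          have hxhead : ∀ a t, dw2.dropWhile pvIsBlank = a :: t → pvIsBlank a = false := by
            intro a t ha
            have hne : dw2.dropWhile pvIsBlank ≠ [] := by rw [ha]; simp
            have h5 := List.head_dropWhile_not pvIsBlank hne
            simp only [ha, List.head_cons] at h5
            simpa using h5
          have IH := ih (dw2.dropWhile pvIsBlank) hlen hxhead
          have hjoin2 : PySem.Chars.join ['\n'] (List.map String.toList ("" :: y :: ys)) =
              '\n' :: PySem.Chars.join ['\n'] (List.map String.toList (y :: ys)) := by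
            simp only [List.map_cons]
            rw [show ("" : String).toList = [] from rfl, PySem.Chars.join_cons_cons]
            simp
          rw [hec] at IH
          rw [hjoin2, IH]
          -- paragraphs of the tail are nonempty
          have hpe : ∃ P Ps, pvParas (dw2.dropWhile pvIsBlank) = P :: Ps := by
            cases he' : dw2.dropWhile pvIsBlank with
            | nil => rw [he'] at hec; simp [pvCollapse] at hec
            | cons x e2 =>
              have hx : pvIsBlank x = false := hxhead x e2 he'
              exact ⟨x :: e2.takeWhile (fun r => !pvIsBlank r),
                pvParas (e2.dropWhile (fun r => !pvIsBlank r)), by simp [pvParas, hx]⟩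
          obtain ⟨P, Ps, hP⟩ := hpe
          rw [hpd, hP]
          simp only [List.map_cons]
          rw [PySem.Chars.join_cons_cons]
          -- the trailing-blank flags agree
          have htr : pvTrail (r :: rest) = pvTrail (dw2.dropWhile pvIsBlank) := by
            have h1 : (r :: rest).getLast? = (d :: dw2).getLast? := by
              have hsh : r :: rest = (r :: rest.takeWhile (fun x => !pvIsBlank x)) ++
                  (d :: dw2) := by
                rw [List.cons_append]
                refine congrArg (r :: ·) ?_
                rw [← hdwc]
                exact hsplit
              rw [hsh]
              exact List.getLast?_append_of_ne_nil _ (by simp)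
            have hene : dw2.dropWhile pvIsBlank ≠ [] := by
              intro he'
              rw [he'] at hec; simp [pvCollapse] at hec
            obtain ⟨pre, hpre⟩ := List.dropWhile_suffix (l := dw2) pvIsBlank
            have hdw2ne : dw2 ≠ [] := by
              intro h
              exact hene (by rw [h]; rfl)
            have h2 : (d :: dw2).getLast? = dw2.getLast? := by
              rw [show d :: dw2 = [d] ++ dw2 from rfl]
              exact List.getLast?_append_of_ne_nil _ hdw2ne
            have h3 : dw2.getLast? = (dw2.dropWhile pvIsBlank).getLast? := by
              conv_lhs => rw [← hpre]
              exact List.getLast?_append_of_ne_nil _ hene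
            unfold pvTrail
            rw [h1, h2, h3]
          rw [htr]
          simp [List.append_assoc]

-- stripping kills a leading blank run of the collapsed list
lemma pvStrip_collapse_dropWhile (l : List String) :
    PySem.Chars.strip (PySem.Chars.join ['\n'] ((pvCollapse l).map String.toList)) =
      PySem.Chars.strip (PySem.Chars.join ['\n']
        ((pvCollapse (l.dropWhile pvIsBlank)).map String.toList)) := by
  cases l with
  | nil => rfl
  | cons a t =>
    cases hb : pvIsBlank a with
    | false => rw [List.dropWhile_cons_of_neg (by simp [hb])]
    | true =>
      rw [List.dropWhile_cons_of_pos hb]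
      rw [show pvCollapse (a :: t) = "" :: pvCollapse (t.dropWhile pvIsBlank) from by
        simp [pvCollapse, hb]]
      cases hX : pvCollapse (t.dropWhile pvIsBlank) with
      | nil => simp [PySem.Chars.join_singleton, PySem.Chars.join_nil]
      | cons y ys =>
        simp only [List.map_cons]
        rw [show ("" : String).toList = [] from rfl, PySem.Chars.join_cons_cons]
        rw [show ([] : List Char) ++ ['\n'] ++
              PySem.Chars.join ['\n'] (y.toList :: List.map String.toList ys) =
            '\n' :: PySem.Chars.join ['\n'] (y.toList :: List.map String.toList ys) from by simp]
        exact pvStrip_cons_nl _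

-- the central equality: collapsed-and-stripped = paragraphs-joined-and-stripped
lemma pvCentral (body : List String) :
    PySem.Chars.strip (PySem.Chars.join ['\n'] ((pvCollapse body).map String.toList)) =
      PySem.Chars.strip (PySem.Chars.join ['\n', '\n']
        ((pvParas body).map (fun run => PySem.Chars.join ['\n'] (run.map String.toList)))) := by
  rw [pvStrip_collapse_dropWhile]
  rw [← pvParas_dropWhile body]
  have hhead : ∀ a t, body.dropWhile pvIsBlank = a :: t → pvIsBlank a = false := by
    intro a t ha
    have hne : body.dropWhile pvIsBlank ≠ [] := by rw [ha]; simp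
    have h5 := List.head_dropWhile_not pvIsBlank hne
    simp only [ha, List.head_cons] at h5
    simpa using h5
  rw [pvCollapse_norm (body.dropWhile pvIsBlank).length _ le_rfl hhead]
  cases ht : pvTrail (body.dropWhile pvIsBlank) with
  | false => simp
  | true =>
    simp only [if_true]
    exact pvStrip_append_nl _

-- ===== VERDICT (by name: the statement is the Claim_ definition above) =====
theorem clean_job_description_spec : Claim_equal_clean_job_description := by
  intro text max_len _
  unfold Spec_clean_job_description clean_job_description clean_job_description_alt
  cases htx : (text == "") with
  | true => simp
  | false =>
    simp only [Bool.false_eq_true, if_false]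
    rw [pvLoopA_eq]
    simp only [List.nil_append, Bool.false_eq_true, if_false]
    have hcut : PySem.List.slice ((PySem.Str.splitlines text).map PySem.Str.rstrip) none
        (some (pvFindCut (PySem.List.enumerate ((PySem.Str.splitlines text).map PySem.Str.rstrip) 0)
          (((PySem.Str.splitlines text).map PySem.Str.rstrip).length : Int))) =
        ((PySem.Str.splitlines text).map PySem.Str.rstrip).takeWhile (fun l => !pvIsTrunc l) := by
      rw [pvFindCut_eq]
      cases hall : ((PySem.Str.splitlines text).map PySem.Str.rstrip).all (fun r => !pvIsTrunc r) with
      | true =>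
        rw [if_pos rfl, PySem.List.slice_to_natCast, List.take_length]
        exact (List.takeWhile_eq_self_iff.mpr (fun x hx => List.all_eq_true.mp hall x hx)).symm
      | false =>
        rw [if_neg (by simp), zero_add, PySem.List.slice_to_natCast]
        exact (List.prefix_iff_eq_take.mp (List.takeWhile_prefix _)).symm
    rw [hcut, pvParaLoop_eq]
    simp only [List.nil_append]
    rw [pvRunsAux_filter]
    have hnf : ∀ x ∈ (((PySem.Str.splitlines text).map PySem.Str.rstrip).takeWhile
        (fun l => !pvIsTrunc l)).filter (fun l => !pvIsNoise l), pvIsNoise x = false := by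
      intro x hx
      simpa using (List.mem_filter.mp hx).2
    rw [(pvRunsAux_paras ((((PySem.Str.splitlines text).map PySem.Str.rstrip).takeWhile
        (fun l => !pvIsTrunc l)).filter (fun l => !pvIsNoise l)).length _ le_rfl hnf).2]
    have hs : PySem.Str.strip (PySem.Str.join "\n" (pvCollapse
        ((((PySem.Str.splitlines text).map PySem.Str.rstrip).takeWhile
          (fun l => !pvIsTrunc l)).filter (fun l => !pvIsNoise l)))) =
        PySem.Str.strip (PySem.Str.join "\n\n" ((pvParas
        ((((PySem.Str.splitlines text).map PySem.Str.rstrip).takeWhile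
          (fun l => !pvIsTrunc l)).filter (fun l => !pvIsNoise l))).map (PySem.Str.join "\n"))) := by
      apply String.toList_inj.mp
      simp only [PySem.Str.toList_strip, PySem.Str.toList_join, List.map_map]
      rw [show ("\n" : String).toList = ['\n'] from rfl,
          show ("\n\n" : String).toList = ['\n', '\n'] from rfl]
      have h := pvCentral ((((PySem.Str.splitlines text).map PySem.Str.rstrip).takeWhile
          (fun l => !pvIsTrunc l)).filter (fun l => !pvIsNoise l))
      simpa [Function.comp_def, PySem.Str.toList_join] using h
    rw [hs]
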